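-- pv_equiv track=rewrite | github.com/ferhatelmas/algo | topCoder/srms/400s/srm414/div2/restaurant_manager.py | allocateTables
-- ===== SOURCE A (Python) =====
-- from bisect import bisect_left, insort
--
-- def allocateTables(tables, groupSizes, arrivals, departures):
--     a, e, la, le, c = sorted(tables), [], len(tables), 0, 0
--     for g, ar, dep in zip(groupSizes, arrivals, departures):
--         i = 0
--         while i < le and e[i][0] <= ar:
--             insort(a, e.pop(i)[1])
--             la, le = la+1, le-1
--
--         i = bisect_left(a, g)
--         if i < la:
--             insort(e, (dep, a.pop(i)))
--             la, le = la-1, le+1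
--         else:
--             c += g
--     return c
-- ===== SOURCE B (Python) =====
-- def allocateTables(tables, groupSizes, arrivals, departures):
--     free = list(tables)          # unsorted multiset of free table sizes
--     busy = []                    # unsorted list of (departure, table size)
--     rejected = 0
--     for g, ar, dep in zip(groupSizes, arrivals, departures):
--         free += [s for d, s in busy if d <= ar]
--         busy = [(d, s) for d, s in busy if d > ar]
--         best = min((t for t in free if t >= g), default=None)
--         if best is None:
--             rejected += g
--         else:
--             free.remove(best)
--             busy.append((dep, best))
--     return rejected
-- ===== Notes on version B (the rewrite author's own statement) =====
-- stated objective: simpler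
-- what changed: B drops the sorted list, bisect and insort entirely: it keeps free tables as an unsorted multiset and occupied tables as a plain list, frees tables with one comprehension filter per group and picks the best-fit table with a single min scan.
import Mathlib
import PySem

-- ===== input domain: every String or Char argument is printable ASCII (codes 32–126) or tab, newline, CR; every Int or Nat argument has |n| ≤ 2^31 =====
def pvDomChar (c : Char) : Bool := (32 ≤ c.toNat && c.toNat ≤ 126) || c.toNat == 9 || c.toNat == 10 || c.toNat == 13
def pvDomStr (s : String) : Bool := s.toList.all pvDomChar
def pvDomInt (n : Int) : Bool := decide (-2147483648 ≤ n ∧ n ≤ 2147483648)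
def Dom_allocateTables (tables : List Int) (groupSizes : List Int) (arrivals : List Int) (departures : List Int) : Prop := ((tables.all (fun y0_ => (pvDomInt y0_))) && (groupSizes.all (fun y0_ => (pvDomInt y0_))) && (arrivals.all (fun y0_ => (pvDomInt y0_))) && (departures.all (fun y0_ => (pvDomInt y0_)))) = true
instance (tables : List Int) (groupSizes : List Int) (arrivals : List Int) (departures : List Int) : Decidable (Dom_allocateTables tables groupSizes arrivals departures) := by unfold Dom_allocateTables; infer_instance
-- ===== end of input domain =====

-- B replaces A's sorted-list/bisect/insort bookkeeping by an unsorted free multiset with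
-- comprehension filters and a min scan; same return value, no speed claim.

-- ===== PORT A =====
-- bisect.insort(a, x) on a list of Ints: insert x before the first element that x is less than
def insortInt (a : List Int) (x : Int) : List Int :=
  PySem.List.insertBy (fun p q => decide (p < q)) x a

-- Python tuple comparison on (int, int) is lexicographic strict <
def pairLtB (p q : Int × Int) : Bool :=
  decide (p.1 < q.1) || (decide (p.1 = q.1) && decide (p.2 < q.2))

-- bisect.insort(e, x) on a list of int pairs
def insortPair (e : List (Int × Int)) (x : Int × Int) : List (Int × Int) :=
  PySem.List.insertBy pairLtB x e

-- A's inner while loop: pop events from the front of e while their departure ≤ ar,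
-- insorting the freed table size into a (i stays 0: the loop never increments it)
def freeA (ar : Int) : List Int → List (Int × Int) → List Int × List (Int × Int)
  | a, [] => (a, [])
  | a, (d, t) :: rest => if d ≤ ar then freeA ar (insortInt a t) rest else (a, (d, t) :: rest)

-- A's for loop over zip(groupSizes, arrivals, departures); a.pop(i) with i < len(a)
-- is the element at i plus eraseIdx i
def loopA : List (Int × Int × Int) → List Int → List (Int × Int) → Int → Int
  | [], _, _, c => c
  | (g, ar, dep) :: rest, a, e, c =>
    let p := freeA ar a e
    let i := PySem.List.bisectLeft p.1 g
    if h : i < p.1.length then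
      loopA rest (p.1.eraseIdx i) (insortPair p.2 (dep, p.1[i])) c
    else
      loopA rest p.1 p.2 (c + g)

def allocateTables (tables : List Int) (groupSizes : List Int) (arrivals : List Int) (departures : List Int) : Int :=
  loopA (groupSizes.zip (arrivals.zip departures)) (PySem.List.sorted tables (fun x => x)) [] 0

-- ===== PORT B =====
-- B's for loop: free/busy split by two comprehension filters, best-fit by a min scan;
-- free.remove(best) removes the first occurrence of best, which (best ∈ free, by
-- PySem.List.min?_mem) is exactly List.erase (PySem.List.remove?_eq_some_erase)
def loopB : List (Int × Int × Int) → List Int → List (Int × Int) → Int → Int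
  | [], _, _, rejected => rejected
  | (g, ar, dep) :: rest, free, busy, rejected =>
    let free1 := free ++ (busy.filter (fun p => decide (p.1 ≤ ar))).map Prod.snd
    let busy1 := busy.filter (fun p => decide (ar < p.1))
    match PySem.List.min? (free1.filter (fun t => decide (g ≤ t))) (fun t => t) with
    | none => loopB rest free1 busy1 (rejected + g)
    | some best => loopB rest (free1.erase best) (busy1 ++ [(dep, best)]) rejected

def allocateTables_alt (tables : List Int) (groupSizes : List Int) (arrivals : List Int) (departures : List Int) : Int :=
  loopB (groupSizes.zip (arrivals.zip departures)) tables [] 0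

-- ===== PRECONDITION & SPEC =====
def Spec_allocateTables (tables : List Int) (groupSizes : List Int) (arrivals : List Int) (departures : List Int) (out : Int) : Prop := out = allocateTables_alt tables groupSizes arrivals departures
instance (tables : List Int) (groupSizes : List Int) (arrivals : List Int) (departures : List Int) (out : Int) : Decidable (Spec_allocateTables tables groupSizes arrivals departures out) := by unfold Spec_allocateTables; infer_instance

-- ===== CLAIM (what is proved, stated in full; the proofs are below) =====
def Claim_equal_allocateTables : Prop := ∀ (tables : List Int) (groupSizes : List Int) (arrivals : List Int) (departures : List Int), Dom_allocateTables tables groupSizes arrivals departures → Spec_allocateTables tables groupSizes arrivals departures (allocateTables tables groupSizes arrivals departures)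

-- ===== LEMMAS AND PROOFS =====

-- the lexicographic ≤ on int pairs (Python tuple order)
def pairLe (p q : Int × Int) : Prop := p.1 < q.1 ∨ (p.1 = q.1 ∧ p.2 ≤ q.2)

theorem pairLe_trans {p q r : Int × Int} (h1 : pairLe p q) (h2 : pairLe q r) : pairLe p r := by
  unfold pairLe at *; omega

theorem pairLtB_le {p q : Int × Int} (h : pairLtB p q = true) : pairLe p q := by
  simp [pairLtB] at h; unfold pairLe; omega

theorem pairLtB_false_le {p q : Int × Int} (h : pairLtB p q = false) : pairLe q p := by
  simp [pairLtB] at h; unfold pairLe; omega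

theorem insertBy_perm {α : Type} (before : α → α → Bool) (x : α) (l : List α) :
    (PySem.List.insertBy before x l).Perm (x :: l) := by
  induction l with
  | nil => simp [PySem.List.insertBy]
  | cons y ys ih =>
    simp only [PySem.List.insertBy]
    split
    · exact List.Perm.refl _
    · exact (ih.cons y).trans (List.Perm.swap x y ys)

theorem insertBy_pairwise {α : Type} (le : α → α → Prop) (before : α → α → Bool) (x : α)
    (htrans : ∀ a b c, le a b → le b c → le a c)
    (h1 : ∀ a b, before a b = true → le a b)
    (h2 : ∀ a b, before a b = false → le b a)
    (l : List α) (hp : l.Pairwise le) : (PySem.List.insertBy before x l).Pairwise le := by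
  induction l with
  | nil => simp [PySem.List.insertBy]
  | cons y ys ih =>
    rcases List.pairwise_cons.mp hp with ⟨hy, hys⟩
    simp only [PySem.List.insertBy]
    split
    · rename_i hb
      refine List.Pairwise.cons ?_ hp
      intro z hz
      rcases List.mem_cons.mp hz with rfl | hz
      · exact h1 _ _ hb
      · exact htrans _ _ _ (h1 _ _ hb) (hy z hz)
    · rename_i hb
      refine List.Pairwise.cons ?_ (ih hys)
      intro z hz
      rcases (PySem.List.mem_insertBy _ _ _ _).mp hz with rfl | hz
      · exact h2 _ _ (Bool.eq_false_iff.mpr hb)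
      · exact hy z hz

theorem insortInt_perm (a : List Int) (x : Int) : (insortInt a x).Perm (x :: a) :=
  insertBy_perm _ x a

theorem insortInt_pairwise (x : Int) {a : List Int} (h : a.Pairwise (· ≤ ·)) :
    (insortInt a x).Pairwise (· ≤ ·) := by
  refine insertBy_pairwise (fun p q => p ≤ q) _ x (fun a b c hab hbc => le_trans hab hbc) ?_ ?_ a h
  · intro a b hb; have := of_decide_eq_true hb; omega
  · intro a b hb; have := of_decide_eq_false hb; omega

theorem insortPair_perm (e : List (Int × Int)) (x : Int × Int) :
    (insortPair e x).Perm (x :: e) := insertBy_perm _ x e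

theorem insortPair_pairwise (x : Int × Int) {e : List (Int × Int)} (h : e.Pairwise pairLe) :
    (insortPair e x).Pairwise pairLe := by
  refine insertBy_pairwise pairLe _ x (fun a b c hab hbc => pairLe_trans hab hbc) ?_ ?_ e h
  · intro a b hb; exact pairLtB_le hb
  · intro a b hb; exact pairLtB_false_le hb

theorem foldl_insortInt_perm (L : List Int) : ∀ a : List Int, (L.foldl insortInt a).Perm (a ++ L) := by
  induction L with
  | nil => intro a; simp
  | cons t L ih =>
    intro a
    simp only [List.foldl_cons]
    refine (ih (insortInt a t)).trans ?_
    exact (((insortInt_perm a t).append_right L).trans List.perm_middle.symm)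

theorem foldl_insortInt_pairwise (L : List Int) :
    ∀ a : List Int, a.Pairwise (· ≤ ·) → (L.foldl insortInt a).Pairwise (· ≤ ·) := by
  induction L with
  | nil => intro a h; simpa using h
  | cons t L ih =>
    intro a h
    simp only [List.foldl_cons]
    exact ih _ (insortInt_pairwise t h)

-- A's inner while loop, characterised: it frees exactly the events with departure ≤ ar
theorem freeA_eq (ar : Int) (e : List (Int × Int)) :
    ∀ a : List Int, e.Pairwise pairLe →
      freeA ar a e = (((e.filter (fun p => decide (p.1 ≤ ar))).map Prod.snd).foldl insortInt a,
                      e.filter (fun p => decide (ar < p.1))) := by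
  induction e with
  | nil => intro a _; simp [freeA]
  | cons hd rest ih =>
    obtain ⟨d, t⟩ := hd
    intro a hp
    by_cases h : d ≤ ar
    · have h2 : ¬ ar < d := not_lt.mpr h
      simp only [freeA, if_pos h, List.filter_cons]
      simpa [h, h2] using ih (insortInt a t) hp.of_cons
    · have hall : ∀ q ∈ rest, ar < q.1 := by
        intro q hq
        have hle : pairLe (d, t) q := (List.pairwise_cons.mp hp).1 q hq
        unfold pairLe at hle
        omega
      have hfl : rest.filter (fun p => decide (p.1 ≤ ar)) = [] := by
        rw [List.filter_eq_nil_iff]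
        intro q hq
        have := hall q hq
        simp; omega
      have hfr : rest.filter (fun p => decide (ar < p.1)) = rest := by
        rw [List.filter_eq_self]
        intro q hq
        simpa using hall q hq
      have h2 : ar < d := not_le.mp h
      simp [freeA, h, h2, hfl, hfr]

-- on a sorted list, the elements ≥ g are exactly the suffix from bisect_left
theorem filter_ge_eq_drop (g : Int) {a : List Int} (h : a.Pairwise (· ≤ ·)) :
    a.filter (fun t => decide (g ≤ t)) = a.drop (PySem.List.bisectLeft a g) := by
  obtain ⟨hle, hlt, hge⟩ := PySem.List.bisectLeft_spec a g h
  conv_lhs => rw [← List.take_append_drop (PySem.List.bisectLeft a g) a]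
  rw [List.filter_append]
  have h1 : (a.take (PySem.List.bisectLeft a g)).filter (fun t => decide (g ≤ t)) = [] := by
    rw [List.filter_eq_nil_iff]
    intro x hx
    obtain ⟨j, hj, rfl⟩ := List.getElem_of_mem hx
    have hj' : j < a.length := lt_of_lt_of_le (lt_of_lt_of_le hj (by simp)) (le_refl _)
    have hji : j < PySem.List.bisectLeft a g := lt_of_lt_of_le hj (by simp)
    have := hlt j hj' hji
    simp only [List.getElem_take]
    simp; omega
  have h2 : (a.drop (PySem.List.bisectLeft a g)).filter (fun t => decide (g ≤ t))
      = a.drop (PySem.List.bisectLeft a g) := by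
    rw [List.filter_eq_self]
    intro x hx
    obtain ⟨j, hj, rfl⟩ := List.getElem_of_mem hx
    have hj' : PySem.List.bisectLeft a g + j < a.length := by
      have := hj; simp [List.length_drop] at this; omega
    have := hge (PySem.List.bisectLeft a g + j) hj' (Nat.le_add_right _ _)
    simp only [List.getElem_drop]
    simpa using this
  rw [h1, h2, List.nil_append]

-- Python's min() value is a multiset invariant
theorem min?_id_perm {l l' : List Int} (h : l.Perm l') :
    PySem.List.min? l (fun t => t) = PySem.List.min? l' (fun t => t) := by
  cases h1 : PySem.List.min? l (fun t => t) with
  | none =>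
    rw [PySem.List.min?_eq_none_iff] at h1
    subst h1
    have h2 : l' = [] := h.nil_eq.symm
    subst h2
    exact ((PySem.List.min?_eq_none_iff _ _).mpr rfl).symm
  | some m =>
    cases h2 : PySem.List.min? l' (fun t => t) with
    | none =>
      rw [PySem.List.min?_eq_none_iff] at h2
      subst h2
      have h3 : l = [] := h.eq_nil
      subst h3
      have h4 := ((PySem.List.min?_eq_none_iff ([] : List Int) (fun t => t)).mpr rfl).symm.trans h1
      exact absurd h4 (by simp)
    | some m' =>
      have hm : m ∈ l := PySem.List.min?_mem h1
      have hm' : m' ∈ l' := PySem.List.min?_mem h2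
      have h3 : m ≤ m' := PySem.List.min?_isMin h1 m' (h.symm.mem_iff.mp hm')
      have h4 : m' ≤ m := PySem.List.min?_isMin h2 m (h.mem_iff.mp hm)
      rw [le_antisymm h3 h4]

theorem min?_id_sorted_cons {x : Int} {t : List Int} (h : (x :: t).Pairwise (· ≤ ·)) :
    PySem.List.min? (x :: t) (fun t => t) = some x := by
  cases h1 : PySem.List.min? (x :: t) (fun t => t) with
  | none =>
    rw [PySem.List.min?_eq_none_iff] at h1
    exact absurd h1 (by simp)
  | some m =>
    have hm : m ∈ x :: t := PySem.List.min?_mem h1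
    have h3 : m ≤ x := PySem.List.min?_isMin h1 x (List.mem_cons_self)
    have h4 : x ≤ m := by
      rcases List.mem_cons.mp hm with rfl | hm
      · exact le_refl _
      · exact (List.pairwise_cons.mp h).1 m hm
    rw [le_antisymm h4 h3]

-- list.remove of a[i] (i = bisect_left, the first element ≥ g) is exactly a.pop(i)
theorem erase_getElem_bisect (g : Int) {a : List Int} (h : a.Pairwise (· ≤ ·))
    (hi : PySem.List.bisectLeft a g < a.length) :
    a.erase a[PySem.List.bisectLeft a g] = a.eraseIdx (PySem.List.bisectLeft a g) := by
  obtain ⟨hle, hlt, hge⟩ := PySem.List.bisectLeft_spec a g h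
  have hg : g ≤ a[PySem.List.bisectLeft a g] := hge _ hi (le_refl _)
  have hnot : a[PySem.List.bisectLeft a g] ∉ a.take (PySem.List.bisectLeft a g) := by
    intro hv
    obtain ⟨j, hj, hEq⟩ := List.getElem_of_mem hv
    have hji : j < PySem.List.bisectLeft a g := lt_of_lt_of_le hj (by simp)
    have hj' : j < a.length := lt_of_lt_of_le hji hle
    rw [List.getElem_take] at hEq
    have := hlt j hj' hji
    omega
  have hsplit : a = a.take (PySem.List.bisectLeft a g)
      ++ a[PySem.List.bisectLeft a g] :: a.drop (PySem.List.bisectLeft a g + 1) := by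
    conv_lhs => rw [← List.take_append_drop (PySem.List.bisectLeft a g) a]
    rw [List.drop_eq_getElem_cons hi]
  set v := a[PySem.List.bisectLeft a g] with hv
  rw [List.eraseIdx_eq_take_drop_succ]
  conv_lhs => rw [hsplit]
  rw [List.erase_append_right _ hnot, List.erase_cons_head]

-- the main loop invariant: A's (sorted avail, sorted events) is a rearrangement of B's
-- (free multiset, busy list), and then the two loops return the same count
theorem loop_eq (l : List (Int × Int × Int)) :
    ∀ (a free : List Int) (e busy : List (Int × Int)) (c : Int),
      a.Pairwise (· ≤ ·) → e.Pairwise pairLe → a.Perm free → e.Perm busy →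
      loopA l a e c = loopB l free busy c := by
  induction l with
  | nil => intros; simp [loopA, loopB]
  | cons hd rest ih =>
    obtain ⟨g, ar, dep⟩ := hd
    intro a free e busy c ha he haf heb
    simp only [loopA, loopB, freeA_eq ar e a he]
    have ha1 : (((e.filter (fun p => decide (p.1 ≤ ar))).map Prod.snd).foldl insortInt a).Pairwise (· ≤ ·) :=
      foldl_insortInt_pairwise _ a ha
    have he1 : (e.filter (fun p => decide (ar < p.1))).Pairwise pairLe :=
      List.Pairwise.sublist List.filter_sublist he
    have haf1 : (((e.filter (fun p => decide (p.1 ≤ ar))).map Prod.snd).foldl insortInt a).Perm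
        (free ++ (busy.filter (fun p => decide (p.1 ≤ ar))).map Prod.snd) :=
      (foldl_insortInt_perm _ a).trans (haf.append ((heb.filter _).map _))
    have heb1 : (e.filter (fun p => decide (ar < p.1))).Perm
        (busy.filter (fun p => decide (ar < p.1))) := heb.filter _
    set a1 := ((e.filter (fun p => decide (p.1 ≤ ar))).map Prod.snd).foldl insortInt a with ha1def
    set free1 := free ++ (busy.filter (fun p => decide (p.1 ≤ ar))).map Prod.snd with hf1def
    have hfd : a1.filter (fun t => decide (g ≤ t)) = a1.drop (PySem.List.bisectLeft a1 g) :=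
      filter_ge_eq_drop g ha1
    obtain ⟨hle, hlt, hge⟩ := PySem.List.bisectLeft_spec a1 g ha1
    by_cases hi : PySem.List.bisectLeft a1 g < a1.length
    · -- a table fits: A pops index i, B removes the min of the fitting tables
      have hdrop : a1.drop (PySem.List.bisectLeft a1 g)
          = a1[PySem.List.bisectLeft a1 g] :: a1.drop (PySem.List.bisectLeft a1 g + 1) :=
        List.drop_eq_getElem_cons hi
      have minA : PySem.List.min? (a1.filter (fun t => decide (g ≤ t))) (fun t => t)
          = some a1[PySem.List.bisectLeft a1 g] := by
        rw [hfd, hdrop]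
        exact min?_id_sorted_cons (by
          rw [← hdrop]
          exact List.Pairwise.sublist (List.drop_sublist _ _) ha1)
      have minB : PySem.List.min? (free1.filter (fun t => decide (g ≤ t))) (fun t => t)
          = some a1[PySem.List.bisectLeft a1 g] :=
        (min?_id_perm (haf1.filter _)).symm.trans minA
      rw [dif_pos hi, minB]
      refine ih _ _ _ _ _ (List.Pairwise.sublist (List.eraseIdx_sublist _ _) ha1)
        (insortPair_pairwise _ he1) ?_ ?_
      · rw [← erase_getElem_bisect g ha1 hi]
        exact haf1.erase _
      · exact (insortPair_perm _ _).trans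
          ((heb1.cons _).trans (List.perm_append_singleton _ _).symm)
    · -- no table fits: both sides reject the group
      have hilen : PySem.List.bisectLeft a1 g = a1.length := le_antisymm hle (not_lt.mp hi)
      have hnilA : a1.filter (fun t => decide (g ≤ t)) = [] := by
        rw [hfd, hilen, List.drop_length]
      have hnilB : free1.filter (fun t => decide (g ≤ t)) = [] :=
        ((haf1.filter _).symm.trans (by rw [hnilA])).eq_nil
      have minB : PySem.List.min? (free1.filter (fun t => decide (g ≤ t))) (fun t => t) = none := by
        rw [hnilB, PySem.List.min?_eq_none_iff]
      rw [dif_neg hi, minB]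
      exact ih _ _ _ _ _ ha1 he1 haf1 heb1

-- ===== VERDICT (by name: the statement is the Claim_ definition above) =====
theorem allocateTables_spec : Claim_equal_allocateTables := by
  intro tables groupSizes arrivals departures _hdom
  unfold Spec_allocateTables allocateTables allocateTables_alt
  refine loop_eq _ _ _ _ _ _ ?_ ?_ ?_ ?_
  · simpa using PySem.List.sorted_pairwise tables (fun x => x)
  · simp
  · exact PySem.List.sorted_perm tables (fun x => x) false
  · simp
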